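-- pv_equiv track=rewrite | github.com/anmalara/monox_fit | utils/workspace/uncertainties.py | get_btag_variations_names
-- ===== SOURCE A (Python) =====
-- def get_btag_variations_names(year: str) -> list[str]:
--     """Get the list of btag variations."""
--     _ = year
--     btag_names = [
--         "CMS_btag_fixedWP_light_correlated",
--         f"CMS_btag_fixedWP_light_uncorrelated_{year}",
--         "CMS_btag_fixedWP_bc_correlated",
--         f"CMS_btag_fixedWP_bc_uncorrelated_{year}",
--     ]
--     if year == "Run3":
--         btag_src = []
--         for y in ["2022", "2022EE", "2023", "2023BPix"]:
--             btag_src += get_btag_variations_names(year=y)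
--         btag_names = list(sorted(set(btag_src)))
--     return btag_names
-- ===== SOURCE B (Python) =====
-- def get_btag_variations_names(year: str) -> list[str]:
--     """Get the list of btag variations."""
--     if year != "Run3":
--         return [
--             "CMS_btag_fixedWP_light_correlated",
--             f"CMS_btag_fixedWP_light_uncorrelated_{year}",
--             "CMS_btag_fixedWP_bc_correlated",
--             f"CMS_btag_fixedWP_bc_uncorrelated_{year}",
--         ]
--     names = {"CMS_btag_fixedWP_light_correlated", "CMS_btag_fixedWP_bc_correlated"}
--     for y in ("2022", "2022EE", "2023", "2023BPix"):
--         names.add(f"CMS_btag_fixedWP_light_uncorrelated_{y}")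
--         names.add(f"CMS_btag_fixedWP_bc_uncorrelated_{y}")
--     return sorted(names)
-- ===== Notes on version B (the rewrite author's own statement) =====
-- stated objective: simpler
-- what changed: Replaced the self-recursive Run3 branch (four recursive calls concatenated, then set+sorted) by a direct non-recursive construction: a set seeded with the two correlated names and extended with the per-year uncorrelated names in one loop, then sorted.
import Mathlib
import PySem

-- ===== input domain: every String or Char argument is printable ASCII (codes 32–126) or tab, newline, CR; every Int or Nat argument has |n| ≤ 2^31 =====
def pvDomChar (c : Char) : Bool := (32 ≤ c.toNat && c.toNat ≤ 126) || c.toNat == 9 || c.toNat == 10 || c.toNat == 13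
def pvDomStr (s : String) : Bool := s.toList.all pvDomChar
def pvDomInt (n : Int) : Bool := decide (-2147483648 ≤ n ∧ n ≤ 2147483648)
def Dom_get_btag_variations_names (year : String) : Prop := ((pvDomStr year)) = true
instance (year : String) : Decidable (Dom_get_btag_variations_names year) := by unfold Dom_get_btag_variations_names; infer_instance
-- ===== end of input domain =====

-- B removes the self-recursion in the Run3 branch: it builds the sorted set of names directly.


-- ===== PORT A =====
def get_btag_variations_names (year : String) : List String :=
  let btag_names :=
    ["CMS_btag_fixedWP_light_correlated",
     "CMS_btag_fixedWP_light_uncorrelated_" ++ year,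
     "CMS_btag_fixedWP_bc_correlated",
     "CMS_btag_fixedWP_bc_uncorrelated_" ++ year]
  if _h : year == "Run3" then
    let btag_src :=
      (["2022", "2022EE", "2023", "2023BPix"].attach).foldl
        (fun acc y => acc ++ get_btag_variations_names y.1) []
    PySem.List.sorted (PySem.Set.ofList btag_src) (fun x => x) false
  else
    btag_names
termination_by (if year = "Run3" then 1 else 0)
decreasing_by
  all_goals (obtain ⟨y, hy⟩ := y; fin_cases hy <;> simp_all)

-- ===== PORT B =====
def get_btag_variations_names_alt (year : String) : List String :=
  if year != "Run3" then
    ["CMS_btag_fixedWP_light_correlated",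
     "CMS_btag_fixedWP_light_uncorrelated_" ++ year,
     "CMS_btag_fixedWP_bc_correlated",
     "CMS_btag_fixedWP_bc_uncorrelated_" ++ year]
  else
    let names := ["2022", "2022EE", "2023", "2023BPix"].foldl
      (fun s y =>
        PySem.Set.add
          (PySem.Set.add s ("CMS_btag_fixedWP_light_uncorrelated_" ++ y))
          ("CMS_btag_fixedWP_bc_uncorrelated_" ++ y))
      (PySem.Set.ofList ["CMS_btag_fixedWP_light_correlated", "CMS_btag_fixedWP_bc_correlated"])
    PySem.List.sorted names (fun x => x) false

-- ===== PRECONDITION & SPEC =====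
def Spec_get_btag_variations_names (year : String) (out : List String) : Prop := out = get_btag_variations_names_alt year
instance (year : String) (out : List String) : Decidable (Spec_get_btag_variations_names year out) := by unfold Spec_get_btag_variations_names; infer_instance

-- ===== CLAIM (what is proved, stated in full; the proofs are below) =====
def Claim_equal_get_btag_variations_names : Prop := ∀ (year : String), Dom_get_btag_variations_names year → Spec_get_btag_variations_names year (get_btag_variations_names year)

-- ===== LEMMAS AND PROOFS =====
theorem btag_not_run3 (year : String) (h : (year == "Run3") = false) :
    get_btag_variations_names year =
      ["CMS_btag_fixedWP_light_correlated",
       "CMS_btag_fixedWP_light_uncorrelated_" ++ year,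
       "CMS_btag_fixedWP_bc_correlated",
       "CMS_btag_fixedWP_bc_uncorrelated_" ++ year] := by
  rw [get_btag_variations_names.eq_def]
  simp [h]

theorem btag_sorted_pairwise :
    (["CMS_btag_fixedWP_bc_correlated",
      "CMS_btag_fixedWP_bc_uncorrelated_2022",
      "CMS_btag_fixedWP_bc_uncorrelated_2022EE",
      "CMS_btag_fixedWP_bc_uncorrelated_2023",
      "CMS_btag_fixedWP_bc_uncorrelated_2023BPix",
      "CMS_btag_fixedWP_light_correlated",
      "CMS_btag_fixedWP_light_uncorrelated_2022",
      "CMS_btag_fixedWP_light_uncorrelated_2022EE",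
      "CMS_btag_fixedWP_light_uncorrelated_2023",
      "CMS_btag_fixedWP_light_uncorrelated_2023BPix"] : List String).Pairwise
      (fun a b => (fun x => x) a < (fun x => x) b) := by
  simp only [List.pairwise_cons, List.mem_cons, String.lt_iff_toList_lt]
  norm_num
  and_intros <;> decide

theorem btag_run3_eq :
    get_btag_variations_names "Run3" = get_btag_variations_names_alt "Run3" := by
  rw [get_btag_variations_names.eq_def, dif_pos (by decide)]
  simp only [List.attach, List.attachWith, List.pmap, List.foldl_cons, List.foldl_nil,
    btag_not_run3 "2022" rfl, btag_not_run3 "2022EE" rfl,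
    btag_not_run3 "2023" rfl, btag_not_run3 "2023BPix" rfl,
    get_btag_variations_names_alt, String.reduceAppend,
    bne_self_eq_false, Bool.false_eq_true, if_false]
  exact (PySem.List.sorted_eq_of_perm_of_pairwise_lt _ _ _ (by decide)
      btag_sorted_pairwise).trans
    (PySem.List.sorted_eq_of_perm_of_pairwise_lt _ _ _ (by decide)
      btag_sorted_pairwise).symm

-- ===== VERDICT (by name: the statement is the Claim_ definition above) =====
theorem get_btag_variations_names_spec : Claim_equal_get_btag_variations_names := by
  intro year _
  unfold Spec_get_btag_variations_names
  by_cases h : year = "Run3"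
  · subst h; exact btag_run3_eq
  · rw [get_btag_variations_names, get_btag_variations_names_alt]
    simp [h]
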